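-- pv_equiv track=rewrite | github.com/camilo-gutierrez/rain-assistant | computer_use_safety.py | detect_sensitive_screen_region
-- ===== SOURCE A (Python) =====
-- from dataclasses import dataclass, field
-- from typing import Optional
--
-- @dataclass
-- class ScreenRegion:
--     """A named screen region with bounds."""
--     name: str
--     x_min: int
--     y_min: int
--     x_max: int
--     y_max: int
--
-- def _get_sensitive_regions(screen_width: int, screen_height: int) -> list[ScreenRegion]:
--     """Define sensitive screen regions for the current resolution."""
--     return [
--         # Windows taskbar (bottom 48px)
--         ScreenRegion("taskbar", 0, screen_height - 48, screen_width, screen_height),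
--         # System tray (bottom-right 300x48)
--         ScreenRegion("system_tray", screen_width - 300, screen_height - 48,
--                       screen_width, screen_height),
--         # Start button area (bottom-left 60x48)
--         ScreenRegion("start_menu", 0, screen_height - 48, 60, screen_height),
--     ]
--
-- def detect_sensitive_screen_region(
--     x: int, y: int,
--     screen_width: int, screen_height: int,
-- ) -> Optional[str]:
--     """Check if coordinates fall in a sensitive screen region.
--
--     Returns the region name if sensitive, None otherwise.
--     """
--     for region in _get_sensitive_regions(screen_width, screen_height):
--         if (region.x_min <= x <= region.x_max and
--                 region.y_min <= y <= region.y_max):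
--             return region.name
--     return None
-- ===== SOURCE B (Python) =====
-- def detect_sensitive_screen_region(x, y, screen_width, screen_height):
--     # The taskbar region spans the entire on-screen width of the bottom-48px
--     # band and contains the other two regions for any real screen, so a single
--     # closed-form membership test suffices: no region table, no loop, no branches.
--     in_band = screen_height - 48 <= y <= screen_height
--     return "taskbar" if in_band and 0 <= x <= screen_width else None
-- ===== Notes on version B (the rewrite author's own statement) =====
-- stated objective: simpler
-- what changed: Replaces the dataclass region table and the search loop with one closed-form membership test of the bottom-48px on-screen band (the taskbar rectangle), which subsumes the other two regions for all on-screen points.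
-- intended difference: For points in the bottom-48px band whose x lies outside [0, screen_width] yet inside the system-tray range [screen_width-300, screen_width] or the start-menu range [0, 60] (only possible on degenerate screens narrower than 300px), A labels the off-screen point 'system_tray' or 'start_menu'; B returns None, the intended answer since a point outside the screen's width is in no screen region. — e.g. on detect_sensitive_screen_region(-5, 100, 10, 100): A returns some "system_tray", B returns none
import Mathlib
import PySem

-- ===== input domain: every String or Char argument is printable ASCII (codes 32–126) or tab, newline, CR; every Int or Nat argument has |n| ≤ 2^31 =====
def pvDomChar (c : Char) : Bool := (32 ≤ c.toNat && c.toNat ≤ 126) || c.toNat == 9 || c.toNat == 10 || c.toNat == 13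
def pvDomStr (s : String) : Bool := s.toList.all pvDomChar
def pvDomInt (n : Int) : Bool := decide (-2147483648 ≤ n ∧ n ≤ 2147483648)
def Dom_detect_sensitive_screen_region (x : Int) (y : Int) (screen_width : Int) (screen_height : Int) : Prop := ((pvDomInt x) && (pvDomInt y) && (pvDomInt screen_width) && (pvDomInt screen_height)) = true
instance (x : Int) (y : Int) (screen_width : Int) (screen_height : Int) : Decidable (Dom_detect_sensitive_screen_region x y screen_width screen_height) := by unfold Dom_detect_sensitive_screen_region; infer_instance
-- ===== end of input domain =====

-- B replaces the region table + loop by one closed-form test of the taskbar band; on degenerate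
-- off-screen corners (see D_) B returns None where A returns a region name.

-- ===== PORT A =====
-- Mirrors the dataclass: a named screen region with bounds.
structure ScreenRegion where
  name : String
  x_min : Int
  y_min : Int
  x_max : Int
  y_max : Int
deriving DecidableEq, Repr

def pvGetSensitiveRegions (screen_width : Int) (screen_height : Int) : List ScreenRegion :=
  [ ScreenRegion.mk "taskbar" 0 (screen_height - 48) screen_width screen_height,
    ScreenRegion.mk "system_tray" (screen_width - 300) (screen_height - 48) screen_width screen_height,
    ScreenRegion.mk "start_menu" 0 (screen_height - 48) 60 screen_height ]

-- the 'for region in …: if …: return region.name' loop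
def pvFindRegion (x : Int) (y : Int) : List ScreenRegion → Option String
  | [] => none
  | r :: rs =>
      if r.x_min ≤ x ∧ x ≤ r.x_max ∧ r.y_min ≤ y ∧ y ≤ r.y_max then some r.name
      else pvFindRegion x y rs

def detect_sensitive_screen_region (x : Int) (y : Int) (screen_width : Int) (screen_height : Int) : Option String :=
  pvFindRegion x y (pvGetSensitiveRegions screen_width screen_height)

-- ===== PORT B =====
def detect_sensitive_screen_region_alt (x : Int) (y : Int) (screen_width : Int) (screen_height : Int) : Option String :=
  let in_band := screen_height - 48 ≤ y ∧ y ≤ screen_height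
  if in_band ∧ 0 ≤ x ∧ x ≤ screen_width then some "taskbar" else none

-- ===== PRECONDITION & SPEC =====
-- For bottom-band points whose x is outside [0, screen_width] yet inside the system-tray range
-- [screen_width-300, screen_width] or the start-menu range [0, 60] (possible only on degenerate
-- screens narrower than 300px), A labels the off-screen point "system_tray" or "start_menu";
-- B returns none, the intended answer, since a point outside the screen's width is in no region.
def D_detect_sensitive_screen_region (x : Int) (y : Int) (screen_width : Int) (screen_height : Int) : Prop :=
  (screen_height - 48 ≤ y ∧ y ≤ screen_height) ∧
  ((screen_width - 300 ≤ x ∧ x ≤ screen_width ∧ x < 0) ∨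
   (0 ≤ x ∧ x ≤ 60 ∧ screen_width < x))
instance (x : Int) (y : Int) (screen_width : Int) (screen_height : Int) : Decidable (D_detect_sensitive_screen_region x y screen_width screen_height) := by unfold D_detect_sensitive_screen_region; infer_instance

def Spec_detect_sensitive_screen_region (x : Int) (y : Int) (screen_width : Int) (screen_height : Int) (out : Option String) : Prop := ¬ D_detect_sensitive_screen_region x y screen_width screen_height → out = detect_sensitive_screen_region_alt x y screen_width screen_height
instance (x : Int) (y : Int) (screen_width : Int) (screen_height : Int) (out : Option String) : Decidable (Spec_detect_sensitive_screen_region x y screen_width screen_height out) := by unfold Spec_detect_sensitive_screen_region; infer_instance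

def pvDiffWitness_detect_sensitive_screen_region : Int × Int × Int × Int := (-5, 100, 10, 100)
def pvDiffWitnessOut_detect_sensitive_screen_region : (Option String) × (Option String) := (some "system_tray", none)

-- ===== CLAIM =====
def Claim_unchanged_detect_sensitive_screen_region : Prop := ∀ (x : Int) (y : Int) (screen_width : Int) (screen_height : Int), Dom_detect_sensitive_screen_region x y screen_width screen_height → Spec_detect_sensitive_screen_region x y screen_width screen_height (detect_sensitive_screen_region x y screen_width screen_height)
def Claim_changed_detect_sensitive_screen_region : Prop := Dom_detect_sensitive_screen_region (pvDiffWitness_detect_sensitive_screen_region.1) (pvDiffWitness_detect_sensitive_screen_region.2.1) (pvDiffWitness_detect_sensitive_screen_region.2.2.1) (pvDiffWitness_detect_sensitive_screen_region.2.2.2) ∧ D_detect_sensitive_screen_region (pvDiffWitness_detect_sensitive_screen_region.1) (pvDiffWitness_detect_sensitive_screen_region.2.1) (pvDiffWitness_detect_sensitive_screen_region.2.2.1) (pvDiffWitness_detect_sensitive_screen_region.2.2.2) ∧ detect_sensitive_screen_region (pvDiffWitness_detect_sensitive_screen_region.1) (pvDiffWitness_detect_sensitive_screen_region.2.1) (pvDiffWitness_detect_sensitive_screen_region.2.2.1)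 (pvDiffWitness_detect_sensitive_screen_region.2.2.2) = pvDiffWitnessOut_detect_sensitive_screen_region.1 ∧ detect_sensitive_screen_region_alt (pvDiffWitness_detect_sensitive_screen_region.1) (pvDiffWitness_detect_sensitive_screen_region.2.1) (pvDiffWitness_detect_sensitive_screen_region.2.2.1) (pvDiffWitness_detect_sensitive_screen_region.2.2.2) = pvDiffWitnessOut_detect_sensitive_screen_region.2 ∧ pvDiffWitnessOut_detect_sensitive_screen_region.1 ≠ pvDiffWitnessOut_detect_sensitive_screen_region.2
def Claim_exact_detect_sensitive_screen_region : Prop := ∀ (x : Int) (y : Int) (screen_width : Int) (screen_height : Int), Dom_detect_sensitive_screen_region x y screen_width screen_height → D_detect_sensitive_screen_region x y screen_width screen_height → detect_sensitive_screen_region x y screen_width screen_height ≠ detect_sensitive_screen_region_alt x y screen_width screen_height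

-- ===== LEMMAS AND PROOFS =====

-- ===== VERDICT =====
theorem detect_sensitive_screen_region_spec : Claim_unchanged_detect_sensitive_screen_region := by
  intro x y sw sh _ hD
  unfold D_detect_sensitive_screen_region at hD
  unfold detect_sensitive_screen_region
    detect_sensitive_screen_region_alt pvGetSensitiveRegions
  simp only [pvFindRegion]
  split_ifs <;> first | rfl | (exfalso; exact hD (by omega))

theorem detect_sensitive_screen_region_changed : Claim_changed_detect_sensitive_screen_region := by
  unfold Claim_changed_detect_sensitive_screen_region; decide

theorem detect_sensitive_screen_region_tight : Claim_exact_detect_sensitive_screen_region := by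
  intro x y sw sh _ hD
  unfold D_detect_sensitive_screen_region at hD
  obtain ⟨hband, hcase⟩ := hD
  unfold detect_sensitive_screen_region detect_sensitive_screen_region_alt pvGetSensitiveRegions
  simp only [pvFindRegion]
  rcases hcase with h | h <;> split_ifs <;> first | omega | simp
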